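-- pv_equiv track=rewrite | github.com/OthmanMohammad/multi-agent-support-system | src/agents/revenue/customer_success/retention/save_team_coordinator.py | _categorize_churn_indicators
-- ===== SOURCE A (Python) =====
-- from typing import Any
--
-- def _categorize_churn_indicators(
--     churn_indicators: list[dict[str, Any]]
-- ) -> dict[str, list[str]]:
--     """Categorize churn indicators by type."""
--     categorized = {
--         "product": [],
--         "support": [],
--         "financial": [],
--         "engagement": [],
--         "competitive": [],
--     }
--
--     for indicator in churn_indicators:
--         indicator_type = indicator.get("type", "unknown")
--         indicator_desc = indicator.get("description", indicator_type)
--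
--         if (
--             "feature" in indicator_type
--             or "product" in indicator_type
--             or "bug" in indicator_type
--         ):
--             categorized["product"].append(indicator_desc)
--         elif "support" in indicator_type or "ticket" in indicator_type:
--             categorized["support"].append(indicator_desc)
--         elif (
--             "payment" in indicator_type
--             or "price" in indicator_type
--             or "billing" in indicator_type
--         ):
--             categorized["financial"].append(indicator_desc)
--         elif (
--             "usage" in indicator_type
--             or "login" in indicator_type
--             or "engagement" in indicator_type
--         ):
--             categorized["engagement"].append(indicator_desc)
--         elif "competitor" in indicator_type or "alternative" in indicator_type:
--             categorized["competitive"].append(indicator_desc)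
--         else:
--             categorized["engagement"].append(indicator_desc)
--
--     return {k: v for k, v in categorized.items() if v}  # Remove empty categories
-- ===== SOURCE B (Python) =====
-- _TABLE = [
--     ("product", ("feature", "product", "bug")),
--     ("support", ("support", "ticket")),
--     ("financial", ("payment", "price", "billing")),
--     ("engagement", ("usage", "login", "engagement")),
--     ("competitive", ("competitor", "alternative")),
-- ]
--
--
-- def _category(indicator):
--     t = indicator.get("type", "unknown")
--     for cat, kws in _TABLE:
--         if any(k in t for k in kws):
--             return cat
--     return "engagement"
--
--
-- def _categorize_churn_indicators(churn_indicators):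
--     result = {}
--     for cat, _ in _TABLE:
--         descs = [i.get("description", i.get("type", "unknown"))
--                  for i in churn_indicators if _category(i) == cat]
--         if descs:
--             result[cat] = descs
--     return result
-- ===== Notes on version B (the rewrite author's own statement) =====
-- stated objective: idiomatic
-- what changed: Replaces the hard-coded six-way if/elif chain mutating five pre-allocated buckets with a data-driven ordered (category, keywords) table: a small classifier scans the table per item, and the result dict is built category-major (one comprehension per category, kept only if nonempty) instead of item-major bucket mutation.
import Mathlib
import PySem

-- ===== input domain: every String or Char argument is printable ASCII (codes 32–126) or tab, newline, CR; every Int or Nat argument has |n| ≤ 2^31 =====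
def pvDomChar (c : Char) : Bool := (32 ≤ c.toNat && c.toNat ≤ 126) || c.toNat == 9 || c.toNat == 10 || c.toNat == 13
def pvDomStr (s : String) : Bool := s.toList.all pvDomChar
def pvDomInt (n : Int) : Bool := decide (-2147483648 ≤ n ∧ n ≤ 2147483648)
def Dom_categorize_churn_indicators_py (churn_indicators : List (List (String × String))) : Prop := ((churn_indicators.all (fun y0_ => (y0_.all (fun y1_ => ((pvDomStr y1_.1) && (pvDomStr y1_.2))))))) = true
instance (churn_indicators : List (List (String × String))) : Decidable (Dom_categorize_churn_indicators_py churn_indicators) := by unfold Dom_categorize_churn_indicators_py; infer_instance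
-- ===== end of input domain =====

-- B replaces A's hard-coded if/elif chain and item-major bucket mutation by a data-driven
-- keyword table scanned category-major; objective: idiomatic, same cost, exact same output.

-- shared primitive: indicator.get(k, dflt) on the association-list encoding of the dict
def pvGet (ind : List (String × String)) (k dflt : String) : String :=
  (PySem.Dict.mk ind).getD k dflt

-- ===== PORT A =====
def pvAStep (d : PySem.Dict String (List String)) (ind : List (String × String)) :
    PySem.Dict String (List String) :=
  let t := pvGet ind "type" "unknown"
  let desc := pvGet ind "description" t
  if PySem.Str.isIn "feature" t || PySem.Str.isIn "product" t || PySem.Str.isIn "bug" t then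
    d.modify "product" [] (· ++ [desc])
  else if PySem.Str.isIn "support" t || PySem.Str.isIn "ticket" t then
    d.modify "support" [] (· ++ [desc])
  else if PySem.Str.isIn "payment" t || PySem.Str.isIn "price" t || PySem.Str.isIn "billing" t then
    d.modify "financial" [] (· ++ [desc])
  else if PySem.Str.isIn "usage" t || PySem.Str.isIn "login" t || PySem.Str.isIn "engagement" t then
    d.modify "engagement" [] (· ++ [desc])
  else if PySem.Str.isIn "competitor" t || PySem.Str.isIn "alternative" t then
    d.modify "competitive" [] (· ++ [desc])
  else
    d.modify "engagement" [] (· ++ [desc])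

def pvAInit : PySem.Dict String (List String) :=
  PySem.Dict.ofList
    [("product", []), ("support", []), ("financial", []), ("engagement", []), ("competitive", [])]

def categorize_churn_indicators_py (churn_indicators : List (List (String × String))) :
    List (String × List String) :=
  ((churn_indicators.foldl pvAStep pvAInit).items).filter (fun kv => !kv.2.isEmpty)

-- ===== PORT B =====
def pvTable : List (String × List String) :=
  [("product", ["feature", "product", "bug"]),
   ("support", ["support", "ticket"]),
   ("financial", ["payment", "price", "billing"]),
   ("engagement", ["usage", "login", "engagement"]),
   ("competitive", ["competitor", "alternative"])]

def pvCategory (ind : List (String × String)) : String :=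
  let t := pvGet ind "type" "unknown"
  match pvTable.find? (fun ck => ck.2.any (fun kw => PySem.Str.isIn kw t)) with
  | some ck => ck.1
  | none => "engagement"

-- result dict built over pvTable's FRESH, distinct keys in order: insertion = list append, exact
def categorize_churn_indicators_py_alt (churn_indicators : List (List (String × String))) :
    List (String × List String) :=
  pvTable.foldl
    (fun acc ck =>
      let descs :=
        (churn_indicators.filter (fun i => pvCategory i == ck.1)).map
          (fun i => pvGet i "description" (pvGet i "type" "unknown"))
      if descs.isEmpty then acc else acc ++ [(ck.1, descs)])
    []

-- ===== PRECONDITION & SPEC =====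
def Spec_categorize_churn_indicators_py (churn_indicators : List (List (String × String))) (out : List (String × List String)) : Prop := out = categorize_churn_indicators_py_alt churn_indicators
instance (churn_indicators : List (List (String × String))) (out : List (String × List String)) : Decidable (Spec_categorize_churn_indicators_py churn_indicators out) := by unfold Spec_categorize_churn_indicators_py; infer_instance

-- ===== CLAIM (what is proved, stated in full; the proofs are below) =====
def Claim_equal_categorize_churn_indicators_py : Prop := ∀ (churn_indicators : List (List (String × String))), Dom_categorize_churn_indicators_py churn_indicators → Spec_categorize_churn_indicators_py churn_indicators (categorize_churn_indicators_py churn_indicators)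

-- ===== LEMMAS AND PROOFS =====

-- A's if/elif chain is exactly a modify at the key B's table classifier computes
theorem pvAStep_eq (d : PySem.Dict String (List String)) (ind : List (String × String)) :
    pvAStep d ind =
      d.modify (pvCategory ind) []
        (· ++ [pvGet ind "description" (pvGet ind "type" "unknown")]) := by
  unfold pvAStep pvCategory
  simp only [pvTable, List.find?, List.any_cons, List.any_nil, Bool.or_false, Bool.or_assoc]
  generalize pvGet ind "type" "unknown" = t
  generalize (PySem.Str.isIn "feature" t || (PySem.Str.isIn "product" t || PySem.Str.isIn "bug" t)) = g1
  generalize (PySem.Str.isIn "support" t || PySem.Str.isIn "ticket" t) = g2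
  generalize (PySem.Str.isIn "payment" t || (PySem.Str.isIn "price" t || PySem.Str.isIn "billing" t)) = g3
  generalize (PySem.Str.isIn "usage" t || (PySem.Str.isIn "login" t || PySem.Str.isIn "engagement" t)) = g4
  generalize (PySem.Str.isIn "competitor" t || PySem.Str.isIn "alternative" t) = g5
  cases g1 <;> cases g2 <;> cases g3 <;> cases g4 <;> cases g5 <;> rfl

theorem pvCategory_mem (ind : List (String × String)) :
    pvCategory ind ∈ ["product", "support", "financial", "engagement", "competitive"] := by
  unfold pvCategory
  dsimp only
  cases h : pvTable.find? (fun ck => ck.2.any (fun kw => PySem.Str.isIn kw (pvGet ind "type" "unknown"))) with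
  | none => simp
  | some ck =>
    have hm := List.mem_of_find?_eq_some h
    simp only [pvTable, List.mem_cons, List.not_mem_nil, or_false] at hm
    rcases hm with h' | h' | h' | h' | h' <;> subst h' <;> simp

-- A's item-major loop rewritten as the canonical grouping fold over (category, description) pairs
theorem pvFold_eq (xs : List (List (String × String))) (d : PySem.Dict String (List String)) :
    xs.foldl pvAStep d =
      (xs.map (fun i => (pvCategory i, pvGet i "description" (pvGet i "type" "unknown")))).foldl
        (fun d p => d.modify p.1 [] (· ++ [p.2])) d := by
  rw [List.foldl_map]
  exact List.foldl_ext _ _ _ (fun d i _ => pvAStep_eq d i)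

-- the final dict's value at any key is that key's category-major bucket
theorem pvFold_getD (xs : List (List (String × String))) (c : String) :
    (xs.foldl pvAStep pvAInit).getD c [] =
      pvAInit.getD c [] ++
        ((xs.filter (fun i => pvCategory i == c)).map
          (fun i => pvGet i "description" (pvGet i "type" "unknown"))) := by
  rw [pvFold_eq, PySem.Dict.getD_foldl_modify_append, List.filter_map, List.map_map]
  rfl

-- every step modifies an existing key, so the key list never changes
theorem pvFold_keys (xs : List (List (String × String))) :
    ∀ d : PySem.Dict String (List String),
      d.keys = ["product", "support", "financial", "engagement", "competitive"] →
      (xs.foldl pvAStep d).keys =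
        ["product", "support", "financial", "engagement", "competitive"] := by
  induction xs with
  | nil => intro d h; exact h
  | cons i xs ih =>
    intro d h
    rw [List.foldl_cons, pvAStep_eq]
    apply ih
    have hc : d.contains (pvCategory i) = true := by
      rw [PySem.Dict.contains_iff_mem_keys, h]
      exact pvCategory_mem i
    rw [PySem.Dict.keys_modify, PySem.Dict.keys_insert_of_contains _ _ hc, h]

-- ===== VERDICT (by name: the statement is the Claim_ definition above) =====
theorem categorize_churn_indicators_py_spec : Claim_equal_categorize_churn_indicators_py := by
  intro xs _
  show categorize_churn_indicators_py xs = categorize_churn_indicators_py_alt xs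
  unfold categorize_churn_indicators_py categorize_churn_indicators_py_alt
  have hkeys := pvFold_keys xs pvAInit (by rfl)
  have hnd : (xs.foldl pvAStep pvAInit).keys.Nodup := by rw [hkeys]; decide
  rw [PySem.Dict.items_eq_map_keys _ hnd [], hkeys]
  simp only [List.map_cons, List.map_nil, pvFold_getD,
    show pvAInit.getD "product" [] = [] from rfl,
    show pvAInit.getD "support" [] = [] from rfl,
    show pvAInit.getD "financial" [] = [] from rfl,
    show pvAInit.getD "engagement" [] = [] from rfl,
    show pvAInit.getD "competitive" [] = [] from rfl,
    List.nil_append]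
  simp only [pvTable, List.foldl_cons, List.foldl_nil]
  generalize ((xs.filter (fun i => pvCategory i == "product")).map
    (fun i => pvGet i "description" (pvGet i "type" "unknown"))) = l1
  generalize ((xs.filter (fun i => pvCategory i == "support")).map
    (fun i => pvGet i "description" (pvGet i "type" "unknown"))) = l2
  generalize ((xs.filter (fun i => pvCategory i == "financial")).map
    (fun i => pvGet i "description" (pvGet i "type" "unknown"))) = l3
  generalize ((xs.filter (fun i => pvCategory i == "engagement")).map
    (fun i => pvGet i "description" (pvGet i "type" "unknown"))) = l4
  generalize ((xs.filter (fun i => pvCategory i == "competitive")).map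
    (fun i => pvGet i "description" (pvGet i "type" "unknown"))) = l5
  cases l1 <;> cases l2 <;> cases l3 <;> cases l4 <;> cases l5 <;>
    simp [List.filter, List.isEmpty]
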